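-- pv_equiv track=rewrite | github.com/franklinbaldo/the-lab | tools/sync_to_blog.py | infer_persona
-- ===== SOURCE A (Python) =====
-- def infer_persona(filename: str) -> str:
--     """Infer persona from filename prefix."""
--     prefixes = {
--         'baldo_': 'baldo', 'scott_': 'scott', 'sabine_': 'sabine',
--         'pearl_': 'pearl', 'fuchs_': 'fuchs', 'liang_': 'liang',
--         'wolfram_': 'wolfram', 'mycroft_': 'mycroft', 'giles_': 'giles',
--     }
--     for prefix, persona in prefixes.items():
--         if filename.startswith(prefix):
--             return persona
--
--     # Legacy unprefixed papers
--     legacy_scott = ['chsh_', 'llm_', 'the_', 'simulating_', 'external_']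
--     for prefix in legacy_scott:
--         if filename.startswith(prefix):
--             return 'scott'
--     return 'baldo'
-- ===== SOURCE B (Python) =====
-- _PERSONAS = {
--     'baldo_': 'baldo', 'scott_': 'scott', 'sabine_': 'sabine',
--     'pearl_': 'pearl', 'fuchs_': 'fuchs', 'liang_': 'liang',
--     'wolfram_': 'wolfram', 'mycroft_': 'mycroft', 'giles_': 'giles',
--     'chsh_': 'scott', 'llm_': 'scott', 'the_': 'scott',
--     'simulating_': 'scott', 'external_': 'scott',
-- }
--
--
-- def infer_persona(filename: str) -> str:
--     """Infer persona from filename prefix via one keyed lookup."""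
--     i = filename.find('_')
--     key = filename[:i + 1] if i != -1 else ''
--     return _PERSONAS.get(key, 'baldo')
-- ===== Notes on version B (the rewrite author's own statement) =====
-- stated objective: idiomatic
-- what changed: Both sequential startswith scans are replaced by one merged prefix table keyed by the filename's segment up to and including its first underscore, found once with str.find, so the answer is a single dict lookup with the same default fallback persona.
import Mathlib
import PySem

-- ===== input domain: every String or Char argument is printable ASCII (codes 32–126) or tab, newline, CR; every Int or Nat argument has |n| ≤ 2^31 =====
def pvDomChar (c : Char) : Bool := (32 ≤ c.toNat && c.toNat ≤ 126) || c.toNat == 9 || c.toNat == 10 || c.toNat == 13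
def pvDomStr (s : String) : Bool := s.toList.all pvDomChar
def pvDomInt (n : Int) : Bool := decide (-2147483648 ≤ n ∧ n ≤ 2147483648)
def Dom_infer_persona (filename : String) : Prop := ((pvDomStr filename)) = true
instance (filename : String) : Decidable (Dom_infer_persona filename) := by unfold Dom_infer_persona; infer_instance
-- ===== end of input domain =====

-- B replaces A's two sequential startswith scans by one merged prefix table keyed by the
-- filename's segment up to and including its first underscore (idiomatic; same results).

-- ===== PORT A =====
def infer_persona (filename : String) : String :=
  -- for prefix, persona in prefixes.items(): if filename.startswith(prefix): return persona
  if PySem.Str.startswith filename "baldo_" then "baldo"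
  else if PySem.Str.startswith filename "scott_" then "scott"
  else if PySem.Str.startswith filename "sabine_" then "sabine"
  else if PySem.Str.startswith filename "pearl_" then "pearl"
  else if PySem.Str.startswith filename "fuchs_" then "fuchs"
  else if PySem.Str.startswith filename "liang_" then "liang"
  else if PySem.Str.startswith filename "wolfram_" then "wolfram"
  else if PySem.Str.startswith filename "mycroft_" then "mycroft"
  else if PySem.Str.startswith filename "giles_" then "giles"
  -- for prefix in legacy_scott: if filename.startswith(prefix): return 'scott'
  else if PySem.Str.startswith filename "chsh_" then "scott"
  else if PySem.Str.startswith filename "llm_" then "scott"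
  else if PySem.Str.startswith filename "the_" then "scott"
  else if PySem.Str.startswith filename "simulating_" then "scott"
  else if PySem.Str.startswith filename "external_" then "scott"
  else "baldo"

-- ===== PORT B =====
def pvPersonaTable : PySem.Dict String String :=
  PySem.Dict.ofList
    [("baldo_", "baldo"), ("scott_", "scott"), ("sabine_", "sabine"),
     ("pearl_", "pearl"), ("fuchs_", "fuchs"), ("liang_", "liang"),
     ("wolfram_", "wolfram"), ("mycroft_", "mycroft"), ("giles_", "giles"),
     ("chsh_", "scott"), ("llm_", "scott"), ("the_", "scott"),
     ("simulating_", "scott"), ("external_", "scott")]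

def infer_persona_alt (filename : String) : String :=
  let i := PySem.Str.find filename "_"
  let key := if i ≠ -1 then PySem.Str.slice filename none (some (i + 1)) else ""
  PySem.Dict.getD pvPersonaTable key "baldo"

-- ===== PRECONDITION & SPEC =====
def Spec_infer_persona (filename : String) (out : String) : Prop := out = infer_persona_alt filename
instance (filename : String) (out : String) : Decidable (Spec_infer_persona filename out) := by unfold Spec_infer_persona; infer_instance

-- ===== CLAIM (what is proved, stated in full; the proofs are below) =====
def Claim_equal_infer_persona : Prop := ∀ (filename : String), Dom_infer_persona filename → Spec_infer_persona filename (infer_persona filename)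

-- ===== LEMMAS AND PROOFS =====

-- the common value both programs compute from the segment before the first underscore
def pvPersonaOfKey (t : List Char) : String :=
  if t = "baldo".toList then "baldo"
  else if t = "scott".toList then "scott"
  else if t = "sabine".toList then "sabine"
  else if t = "pearl".toList then "pearl"
  else if t = "fuchs".toList then "fuchs"
  else if t = "liang".toList then "liang"
  else if t = "wolfram".toList then "wolfram"
  else if t = "mycroft".toList then "mycroft"
  else if t = "giles".toList then "giles"
  else if t = "chsh".toList then "scott"
  else if t = "llm".toList then "scott"
  else if t = "the".toList then "scott"
  else if t = "simulating".toList then "scott"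
  else if t = "external".toList then "scott"
  else "baldo"

theorem pv_prefix_iff (q t rest : List Char) (hq : '_' ∉ q) (ht : '_' ∉ t) :
    (q ++ ['_']) <+: (t ++ '_' :: rest) ↔ q = t := by
  induction q generalizing t with
  | nil =>
    cases t with
    | nil => simp
    | cons c ts =>
      constructor
      · rintro ⟨u, hu⟩
        simp at hu
        exact absurd (by simp [← hu.1] : '_' ∈ c :: ts) ht
      · intro h; exact absurd h (by simp)
  | cons c qs ih =>
    cases t with
    | nil =>
      constructor
      · rintro ⟨u, hu⟩
        simp at hu
        exact absurd (by simp [hu.1] : '_' ∈ c :: qs) hq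
      · intro h; exact absurd h (by simp)
    | cons d ts =>
      have hq' : '_' ∉ qs := fun h => hq (List.mem_cons_of_mem _ h)
      have ht' : '_' ∉ ts := fun h => ht (List.mem_cons_of_mem _ h)
      constructor
      · rintro ⟨u, hu⟩
        simp at hu
        obtain ⟨rfl, hu2⟩ := hu
        have : qs = ts := (ih ts hq' ht').mp ⟨u, by simpa using hu2⟩
        simp [this]
      · rintro h
        injection h with h1 h2
        subst h1; subst h2
        exact ⟨rest, by simp⟩

theorem pv_sw_eq (f : String) (t rest : List Char) (hf : f.toList = t ++ '_' :: rest)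
    (ht : '_' ∉ t) (p : String) (q : List Char) (hp : p.toList = q ++ ['_']) (hq : '_' ∉ q) :
    PySem.Str.startswith f p = decide (t = q) := by
  rw [PySem.Str.startswith_eq, hf, hp]
  by_cases h : q = t
  · subst h
    have h1 : PySem.Chars.startswith (q ++ '_' :: rest) (q ++ ['_']) = true :=
      (PySem.Chars.startswith_iff _ _).mpr ((pv_prefix_iff q q rest hq hq).mpr rfl)
    simp [h1]
  · have h1 : PySem.Chars.startswith (t ++ '_' :: rest) (q ++ ['_']) = false := by
      rw [← Bool.not_eq_true, PySem.Chars.startswith_iff]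
      exact fun hc => h ((pv_prefix_iff q t rest hq ht).mp hc)
    have h2 : t ≠ q := fun hh => h hh.symm
    simp [h1, h2]

theorem pv_sw_false (f p : String) (hf : '_' ∉ f.toList) (hp : '_' ∈ p.toList) :
    PySem.Str.startswith f p = false := by
  rw [PySem.Str.startswith_eq, ← Bool.not_eq_true, PySem.Chars.startswith_iff]
  exact fun hc => hf (hc.subset hp)

theorem pv_find_eq_len (f : String) (t rest : List Char) (hf : f.toList = t ++ '_' :: rest)
    (ht : '_' ∉ t) : PySem.Chars.find f.toList ['_'] = (t.length : Int) := by
  have hinf : ['_'] <:+: f.toList := ⟨t, rest, by simp [hf]⟩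
  have h0 : 0 ≤ PySem.Chars.find f.toList ['_'] :=
    (PySem.Chars.find_nonneg_iff _ _).mpr hinf
  obtain ⟨hpre, hmin⟩ := PySem.Chars.find_spec h0
  set j := (PySem.Chars.find f.toList ['_']).toNat with hj
  have hub : j ≤ t.length := by
    by_contra hlt
    push Not at hlt
    exact hmin t.length hlt ⟨rest, by simp [hf]⟩
  have hlb : ¬ j < t.length := by
    intro hlt
    obtain ⟨u, hu⟩ := hpre
    have h1 : f.toList[j]? = some '_' := by
      have h2 : (f.toList.drop j)[0]? = f.toList[j + 0]? := List.getElem?_drop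
      rw [← hu] at h2
      simpa using h2.symm
    have h2 : f.toList[j]? = t[j]? := by
      rw [hf]; exact List.getElem?_append_left hlt
    have h3 : t[j]? = some '_' := by rw [← h2, h1]
    exact ht (List.mem_of_getElem? h3)
  have hje : j = t.length := by omega
  omega

theorem pv_exists_split (l : List Char) (h : '_' ∈ l) :
    ∃ t r, l = t ++ '_' :: r ∧ '_' ∉ t := by
  induction l with
  | nil => cases h
  | cons c cs ih =>
    by_cases hc : c = '_'
    · exact ⟨[], cs, by simp [hc], by simp⟩
    · have hm : '_' ∈ cs := by
        rcases List.mem_cons.mp h with h1 | h1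
        · exact absurd h1.symm hc
        · exact h1
      obtain ⟨t, r, hl, hnt⟩ := ih hm
      refine ⟨c :: t, r, by simp [hl], ?_⟩
      intro hmem
      rcases List.mem_cons.mp hmem with h1 | h1
      · exact hc h1.symm
      · exact hnt h1

theorem pv_str_beq (p key : String) (q t : List Char) (hp : p.toList = q ++ ['_'])
    (hk : key.toList = t ++ ['_']) : (p == key) = decide (t = q) := by
  by_cases h : t = q
  · have : p = key := String.toList_inj.mp (by rw [hp, hk, h])
    simp [this, h]
  · have hne : p ≠ key := by
      intro he
      apply h
      have hl : p.toList = key.toList := by rw [he]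
      rw [hp, hk] at hl
      exact (List.append_cancel_right hl).symm
    simp [hne, h]

theorem pv_a_key (f : String) (t r : List Char) (hf : f.toList = t ++ '_' :: r)
    (ht : '_' ∉ t) : infer_persona f = pvPersonaOfKey t := by
  unfold infer_persona pvPersonaOfKey
  rw [pv_sw_eq f t r hf ht "baldo_" "baldo".toList (by decide) (by decide),
      pv_sw_eq f t r hf ht "scott_" "scott".toList (by decide) (by decide),
      pv_sw_eq f t r hf ht "sabine_" "sabine".toList (by decide) (by decide),
      pv_sw_eq f t r hf ht "pearl_" "pearl".toList (by decide) (by decide),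
      pv_sw_eq f t r hf ht "fuchs_" "fuchs".toList (by decide) (by decide),
      pv_sw_eq f t r hf ht "liang_" "liang".toList (by decide) (by decide),
      pv_sw_eq f t r hf ht "wolfram_" "wolfram".toList (by decide) (by decide),
      pv_sw_eq f t r hf ht "mycroft_" "mycroft".toList (by decide) (by decide),
      pv_sw_eq f t r hf ht "giles_" "giles".toList (by decide) (by decide),
      pv_sw_eq f t r hf ht "chsh_" "chsh".toList (by decide) (by decide),
      pv_sw_eq f t r hf ht "llm_" "llm".toList (by decide) (by decide),
      pv_sw_eq f t r hf ht "the_" "the".toList (by decide) (by decide),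
      pv_sw_eq f t r hf ht "simulating_" "simulating".toList (by decide) (by decide),
      pv_sw_eq f t r hf ht "external_" "external".toList (by decide) (by decide)]
  simp only [decide_eq_true_eq]

theorem pv_getD_mk_cons {κ ν : Type} [BEq κ] (k : κ) (v : ν) (rest : List (κ × ν)) (x : κ) (d : ν) :
    PySem.Dict.getD (PySem.Dict.mk ((k, v) :: rest)) x d
      = if (k == x) = true then v else PySem.Dict.getD (PySem.Dict.mk rest) x d := by
  simp only [PySem.Dict.getD, PySem.Dict.get?_mk_cons]
  by_cases h : (k == x) = true
  · rw [if_pos h, if_pos h]; rfl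
  · rw [if_neg h, if_neg h]

set_option maxHeartbeats 1600000 in
theorem pv_b_key (f : String) (t r : List Char) (hf : f.toList = t ++ '_' :: r)
    (ht : '_' ∉ t) : infer_persona_alt f = pvPersonaOfKey t := by
  have hfind : PySem.Str.find f "_" = (t.length : Int) := by
    rw [PySem.Str.find_eq, show ("_" : String).toList = ['_'] from by decide]
    exact pv_find_eq_len f t r hf ht
  show PySem.Dict.getD pvPersonaTable
      (if PySem.Str.find f "_" ≠ -1 then PySem.Str.slice f none (some (PySem.Str.find f "_" + 1))
       else "") "baldo" = pvPersonaOfKey t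
  rw [hfind, if_pos (by omega : ((t.length : Int)) ≠ -1)]
  have hkey : (PySem.Str.slice f none (some ((t.length : Int) + 1))).toList = t ++ ['_'] := by
    rw [PySem.Str.toList_slice, PySem.Chars.slice_eq_listSlice,
        show ((t.length : Int) + 1) = ((t.length + 1 : Nat) : Int) from by push_cast; ring,
        PySem.List.slice_to_natCast, hf, List.take_append]
    simp
  generalize PySem.Str.slice f none (some ((t.length : Int) + 1)) = key at hkey
  have htab : pvPersonaTable = PySem.Dict.mk
    [("baldo_", "baldo"), ("scott_", "scott"), ("sabine_", "sabine"),
     ("pearl_", "pearl"), ("fuchs_", "fuchs"), ("liang_", "liang"),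
     ("wolfram_", "wolfram"), ("mycroft_", "mycroft"), ("giles_", "giles"),
     ("chsh_", "scott"), ("llm_", "scott"), ("the_", "scott"),
     ("simulating_", "scott"), ("external_", "scott")] := by decide
  have hb0 : (("baldo_" : String) == key) = decide (t = "baldo".toList) := pv_str_beq _ _ _ _ (by decide) hkey
  have hb1 : (("scott_" : String) == key) = decide (t = "scott".toList) := pv_str_beq _ _ _ _ (by decide) hkey
  have hb2 : (("sabine_" : String) == key) = decide (t = "sabine".toList) := pv_str_beq _ _ _ _ (by decide) hkey
  have hb3 : (("pearl_" : String) == key) = decide (t = "pearl".toList) := pv_str_beq _ _ _ _ (by decide) hkey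
  have hb4 : (("fuchs_" : String) == key) = decide (t = "fuchs".toList) := pv_str_beq _ _ _ _ (by decide) hkey
  have hb5 : (("liang_" : String) == key) = decide (t = "liang".toList) := pv_str_beq _ _ _ _ (by decide) hkey
  have hb6 : (("wolfram_" : String) == key) = decide (t = "wolfram".toList) := pv_str_beq _ _ _ _ (by decide) hkey
  have hb7 : (("mycroft_" : String) == key) = decide (t = "mycroft".toList) := pv_str_beq _ _ _ _ (by decide) hkey
  have hb8 : (("giles_" : String) == key) = decide (t = "giles".toList) := pv_str_beq _ _ _ _ (by decide) hkey
  have hb9 : (("chsh_" : String) == key) = decide (t = "chsh".toList) := pv_str_beq _ _ _ _ (by decide) hkey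
  have hb10 : (("llm_" : String) == key) = decide (t = "llm".toList) := pv_str_beq _ _ _ _ (by decide) hkey
  have hb11 : (("the_" : String) == key) = decide (t = "the".toList) := pv_str_beq _ _ _ _ (by decide) hkey
  have hb12 : (("simulating_" : String) == key) = decide (t = "simulating".toList) := pv_str_beq _ _ _ _ (by decide) hkey
  have hb13 : (("external_" : String) == key) = decide (t = "external".toList) := pv_str_beq _ _ _ _ (by decide) hkey
  rw [htab]
  simp only [pv_getD_mk_cons, hb0, hb1, hb2, hb3, hb4, hb5, hb6,
    hb7, hb8, hb9, hb10, hb11, hb12, hb13, decide_eq_true_eq]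
  rfl

-- ===== VERDICT (by name: the statement is the Claim_ definition above) =====
theorem infer_persona_spec : Claim_equal_infer_persona := by
  intro f _
  unfold Spec_infer_persona
  by_cases h : '_' ∈ f.toList
  · obtain ⟨t, r, hf, hnt⟩ := pv_exists_split f.toList h
    rw [pv_a_key f t r hf hnt, pv_b_key f t r hf hnt]
  · have hA : infer_persona f = "baldo" := by
      unfold infer_persona
      rw [pv_sw_false f "baldo_" h (by decide),
          pv_sw_false f "scott_" h (by decide),
          pv_sw_false f "sabine_" h (by decide),
          pv_sw_false f "pearl_" h (by decide),
          pv_sw_false f "fuchs_" h (by decide),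
          pv_sw_false f "liang_" h (by decide),
          pv_sw_false f "wolfram_" h (by decide),
          pv_sw_false f "mycroft_" h (by decide),
          pv_sw_false f "giles_" h (by decide),
          pv_sw_false f "chsh_" h (by decide),
          pv_sw_false f "llm_" h (by decide),
          pv_sw_false f "the_" h (by decide),
          pv_sw_false f "simulating_" h (by decide),
          pv_sw_false f "external_" h (by decide)]
      simp
    have hB : infer_persona_alt f = "baldo" := by
      have hfind : PySem.Str.find f "_" = -1 := by
        rw [PySem.Str.find_eq, show ("_" : String).toList = ['_'] from by decide,
            PySem.Chars.find_eq_neg_one_iff]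
        exact fun hc => h (hc.subset (by simp))
      show PySem.Dict.getD pvPersonaTable
          (if PySem.Str.find f "_" ≠ -1 then PySem.Str.slice f none (some (PySem.Str.find f "_" + 1))
           else "") "baldo" = "baldo"
      rw [hfind, if_neg (by simp)]
      decide
    rw [hA, hB]
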